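-- pv_equiv track=rewrite | github.com/TSheahan/raspberry-ai | mvp-modules/forked_assistant/src/agent_session.py | _word_boundary_chunks
-- ===== SOURCE A (Python) =====
-- from collections.abc import Iterator
--
-- def _word_boundary_chunks(raw_deltas: Iterator[str]) -> Iterator[str]:
--     """Buffer raw delta text and yield only word-boundary-safe chunks.
--
--     Holds the tail of each delta after the last whitespace until the next
--     delta arrives or the stream ends. Prevents a TTS engine from receiving
--     a fragment that the next delta may extend mid-word.
--
--     Treats both space and newline as flush boundaries.
--     """
--     buffer = ""
--     for delta in raw_deltas:
--         buffer += delta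
--         last_ws = max(buffer.rfind(" "), buffer.rfind("\n"))
--         if last_ws >= 0:
--             yield buffer[:last_ws + 1]
--             buffer = buffer[last_ws + 1:]
--     if buffer:
--         yield buffer
-- ===== SOURCE B (Python) =====
-- from collections.abc import Iterator
--
-- def _word_boundary_chunks(raw_deltas: Iterator[str]) -> Iterator[str]:
--     """Staged re-implementation: materialise the deltas, join them once into
--     the full text, compute the global cut positions (one local rfind per
--     delta, offset by its start), then slice the full text at those cuts and
--     yield the remainder.  No carry-over buffer is maintained."""
--     deltas = list(raw_deltas)
--     text = "".join(deltas)
--     cuts = []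
--     off = 0
--     for d in deltas:
--         w = max(d.rfind(" "), d.rfind("\n"))
--         if w >= 0:
--             cuts.append(off + w + 1)
--         off += len(d)
--     prev = 0
--     for c in cuts:
--         yield text[prev:c]
--         prev = c
--     if prev < len(text):
--         yield text[prev:]
-- ===== Notes on version B (the rewrite author's own statement) =====
-- stated objective: faster
-- what changed: B is a staged batch algorithm: it joins all deltas into the full text once, computes the global cut positions with one local rfind per delta plus a running offset, then slices the text at those cuts — no carry-over buffer is concatenated or rescanned.
import Mathlib
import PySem

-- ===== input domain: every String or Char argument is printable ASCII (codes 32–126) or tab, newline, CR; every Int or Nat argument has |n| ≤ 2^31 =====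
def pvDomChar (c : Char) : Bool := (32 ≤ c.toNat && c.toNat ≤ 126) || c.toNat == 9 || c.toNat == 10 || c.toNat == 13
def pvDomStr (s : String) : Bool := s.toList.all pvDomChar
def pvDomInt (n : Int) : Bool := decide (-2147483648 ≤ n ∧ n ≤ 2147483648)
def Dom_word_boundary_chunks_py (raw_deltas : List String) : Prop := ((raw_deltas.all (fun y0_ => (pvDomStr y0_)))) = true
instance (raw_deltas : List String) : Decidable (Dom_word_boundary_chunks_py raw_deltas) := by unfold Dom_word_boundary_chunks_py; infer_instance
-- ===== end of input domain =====

-- B replaces A's streaming carry-over buffer with a staged batch algorithm (join once,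
-- compute global cut positions, slice the full text at them); same output, asymptotically faster.
-- Strings are modelled on code points (List Char) via the PySem.Chars primitives (exact on this domain).

-- ===== PORT A =====
-- one loop iteration of A: buffer += delta; rfind the last ' '/'\n' in the WHOLE buffer; flush up to it
def wbcA_step (st : List String × List Char) (delta : String) : List String × List Char :=
  let buffer := st.2 ++ delta.toList
  let last_ws := max (PySem.Chars.rfind buffer [' ']) (PySem.Chars.rfind buffer ['\n'])
  if 0 ≤ last_ws then
    (st.1 ++ [String.ofList (PySem.Chars.slice buffer none (some (last_ws + 1)))],
     PySem.Chars.slice buffer (some (last_ws + 1)) none)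
  else (st.1, buffer)

def word_boundary_chunks_py (raw_deltas : List String) : List String :=
  let r := raw_deltas.foldl wbcA_step ([], [])
  if r.2.isEmpty then r.1 else r.1 ++ [String.ofList r.2]

-- ===== PORT B =====
-- first staged pass: collect global cut positions (offset + local rfind + 1) per delta
def wbcCut_step (st : List Int × Int) (d : String) : List Int × Int :=
  let w := max (PySem.Chars.rfind d.toList [' ']) (PySem.Chars.rfind d.toList ['\n'])
  ((if 0 ≤ w then st.1 ++ [st.2 + w + 1] else st.1), st.2 + (d.toList.length : Int))

-- second staged pass: slice the full text between consecutive cuts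
def wbcEmit_step (text : List Char) (st : List String × Int) (c : Int) : List String × Int :=
  (st.1 ++ [String.ofList (PySem.Chars.slice text (some st.2) (some c))], c)

def word_boundary_chunks_py_alt (raw_deltas : List String) : List String :=
  let text := (raw_deltas.map String.toList).flatten
  let cuts := (raw_deltas.foldl wbcCut_step ([], 0)).1
  let r := cuts.foldl (wbcEmit_step text) ([], 0)
  if r.2 < (text.length : Int) then r.1 ++ [String.ofList (PySem.Chars.slice text (some r.2) none)]
  else r.1

-- ===== PRECONDITION & SPEC =====
def Spec_word_boundary_chunks_py (raw_deltas : List String) (out : List String) : Prop := out = word_boundary_chunks_py_alt raw_deltas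
instance (raw_deltas : List String) (out : List String) : Decidable (Spec_word_boundary_chunks_py raw_deltas out) := by unfold Spec_word_boundary_chunks_py; infer_instance

-- ===== CLAIM (what is proved, stated in full; the proofs are below) =====
def Claim_equal_word_boundary_chunks_py : Prop := ∀ (raw_deltas : List String), Dom_word_boundary_chunks_py raw_deltas → Spec_word_boundary_chunks_py raw_deltas (word_boundary_chunks_py raw_deltas)

-- ===== LEMMAS AND PROOFS =====

-- intermediate streaming form used only in the proof: A's loop with the rfind restricted to the delta
def wbcM_step (st : List String × List Char) (delta : String) : List String × List Char :=
  let d := delta.toList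
  let cut := max (PySem.Chars.rfind d [' ']) (PySem.Chars.rfind d ['\n'])
  if 0 ≤ cut then
    (st.1 ++ [String.ofList (st.2 ++ PySem.Chars.slice d none (some (cut + 1)))],
     PySem.Chars.slice d (some (cut + 1)) none)
  else (st.1, st.2 ++ d)

def finalizeM (st : List String × List Char) : List String :=
  if st.2.isEmpty then st.1 else st.1 ++ [String.ofList st.2]

-- proof-side Nat formulations of B's two stages
def cutsN : Nat → List String → List Nat
  | _, [] => []
  | off, d :: ds =>
    let w := max (PySem.Chars.rfind d.toList [' ']) (PySem.Chars.rfind d.toList ['\n'])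
    (if 0 ≤ w then [off + (w + 1).toNat] else []) ++ cutsN (off + d.toList.length) ds

def emitN (text : List Char) : Nat → List Nat → List String
  | prev, [] => if prev < text.length then [String.ofList (text.drop prev)] else []
  | prev, c :: cs => String.ofList ((text.drop prev).take (c - prev)) :: emitN text c cs

-- [c] is a prefix of l iff l starts with c
theorem single_isPrefixOf (c : Char) (l : List Char) :
    [c].isPrefixOf l = decide (l.head? = some c) := by
  cases l with
  | nil => simp [List.isPrefixOf]
  | cons a t => simp [List.isPrefixOf, eq_comm, beq_eq_decide]

-- go equations in terms of getElem?
theorem go_zero (s : List Char) (c : Char) :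
    PySem.Chars.rfind.go s [c] 0 = if s[0]? = some c then 0 else -1 := by
  rw [PySem.Chars.rfind.go.eq_1, single_isPrefixOf, List.head?_eq_getElem?]
  by_cases h : s[0]? = some c <;> simp [h]

theorem go_succ (s : List Char) (c : Char) (j : Nat) :
    PySem.Chars.rfind.go s [c] (j + 1) =
      if s[j + 1]? = some c then ((j : Int) + 1) else PySem.Chars.rfind.go s [c] j := by
  rw [PySem.Chars.rfind.go.eq_2, single_isPrefixOf]
  rw [show (s.drop (j+1)).head? = s[j+1]? by rw [List.head?_eq_getElem?, List.getElem?_drop]]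
  by_cases h : s[j + 1]? = some c <;> simp [h]

theorem neg_one_le_go (s : List Char) (c : Char) (k : Nat) :
    -1 ≤ PySem.Chars.rfind.go s [c] k := by
  induction k with
  | zero => rw [go_zero]; split <;> omega
  | succ j ih =>
    rw [go_succ]
    split
    · omega
    · exact ih

theorem go_eq_neg_one_iff (s : List Char) (c : Char) (k : Nat) :
    PySem.Chars.rfind.go s [c] k = -1 ↔ ∀ j : Nat, j ≤ k → s[j]? ≠ some c := by
  induction k with
  | zero =>
    rw [go_zero]
    constructor
    · intro h j hj
      interval_cases j
      intro hc; rw [if_pos hc] at h; omega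
    · intro h; rw [if_neg (h 0 (le_refl 0))]
  | succ j ih =>
    rw [go_succ]
    by_cases hc : s[j + 1]? = some c
    · rw [if_pos hc]
      constructor
      · intro h; omega
      · intro h; exact absurd hc (h (j + 1) (le_refl _))
    · rw [if_neg hc, ih]
      constructor
      · intro h i hi
        rcases Nat.lt_or_ge i (j + 1) with hlt | hge
        · exact h i (by omega)
        · have : i = j + 1 := by omega
          subst this; exact hc
      · intro h i hi; exact h i (by omega)

-- any occurrence at index t ≤ k bounds go from below
theorem le_go_of_getElem (s : List Char) (c : Char) (k t : Nat) (ht : t ≤ k)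
    (h : s[t]? = some c) : (t : Int) ≤ PySem.Chars.rfind.go s [c] k := by
  induction k with
  | zero =>
    have : t = 0 := by omega
    subst this; rw [go_zero, if_pos h]; simp
  | succ j ih =>
    rw [go_succ]
    split
    · have : (t : Int) ≤ (j : Int) + 1 := by exact_mod_cast ht
      exact this
    · rcases Nat.lt_or_ge t (j + 1) with hlt | hge
      · exact ih (by omega)
      · have : t = j + 1 := by omega
        subst this; simp_all

-- a nonnegative go result is an index of an occurrence
theorem go_getElem (s : List Char) (c : Char) (k : Nat)
    (h : 0 ≤ PySem.Chars.rfind.go s [c] k) :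
    s[(PySem.Chars.rfind.go s [c] k).toNat]? = some c := by
  induction k with
  | zero =>
    rw [go_zero] at h ⊢
    split at h
    · simp_all
    · omega
  | succ j ih =>
    rw [go_succ] at h ⊢
    by_cases hc : s[j + 1]? = some c
    · rw [if_pos hc] at h ⊢
      rw [show ((j : Int) + 1).toNat = j + 1 by omega]
      exact hc
    · rw [if_neg hc] at h ⊢
      exact ih h

-- shifting lemma: with a c-free prefix b, the search over b ++ d is the search over d shifted by b.length
theorem go_append_shift (b d : List Char) (c : Char) (hb : ∀ j : Nat, b[j]? ≠ some c) (k : Nat) :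
    PySem.Chars.rfind.go (b ++ d) [c] (b.length + k) =
      if PySem.Chars.rfind.go d [c] k = -1 then -1
      else (b.length : Int) + PySem.Chars.rfind.go d [c] k := by
  induction k with
  | zero =>
    cases hL : b.length with
    | zero =>
      have hb0 : b = [] := List.eq_nil_of_length_eq_zero hL
      subst hb0
      simp only [List.nil_append, Nat.zero_add, Nat.cast_zero]
      split <;> omega
    | succ m =>
      have hprev : PySem.Chars.rfind.go (b ++ d) [c] m = -1 := by
        rw [go_eq_neg_one_iff]
        intro j hj
        rw [List.getElem?_append_left (by omega)]
        exact hb j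
      have hget : (b ++ d)[m + 1]? = d[0]? := by
        rw [List.getElem?_append_right (by omega), show m + 1 - b.length = 0 by omega]
      rw [go_succ, hprev, hget, go_zero]
      split_ifs <;> first | omega | exact (‹False›).elim
  | succ j ih =>
    have hidx : (b ++ d)[b.length + j + 1]? = d[j + 1]? := by
      rw [List.getElem?_append_right (by omega)]
      congr 1; omega
    rw [show b.length + (j + 1) = (b.length + j) + 1 by omega, go_succ, hidx, go_succ]
    by_cases h1 : d[j + 1]? = some c
    · rw [if_pos h1, if_pos h1]
      split_ifs <;> push_cast <;> omega
    · rw [if_neg h1, if_neg h1, ih]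

theorem rfind_append_free (b d : List Char) (c : Char) (hb : ∀ j : Nat, b[j]? ≠ some c) :
    PySem.Chars.rfind (b ++ d) [c] =
      if PySem.Chars.rfind d [c] = -1 then -1
      else (b.length : Int) + PySem.Chars.rfind d [c] := by
  unfold PySem.Chars.rfind
  rw [show (b ++ d).length = b.length + d.length by simp]
  exact go_append_shift b d c hb d.length

theorem neg_one_le_rfind (d : List Char) (c : Char) : -1 ≤ PySem.Chars.rfind d [c] := by
  unfold PySem.Chars.rfind; exact neg_one_le_go d c d.length

-- a nonnegative rfind result is an index into d
theorem rfind_lt_length (d : List Char) (c : Char) (h : 0 ≤ PySem.Chars.rfind d [c]) :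
    PySem.Chars.rfind d [c] < (d.length : Int) := by
  unfold PySem.Chars.rfind at h ⊢
  have hg := go_getElem d c d.length h
  obtain ⟨hlt, -⟩ := List.getElem?_eq_some_iff.mp hg
  omega

-- whitespace-free buffers
def WsFree (b : List Char) : Prop :=
  (∀ j : Nat, b[j]? ≠ some ' ') ∧ (∀ j : Nat, b[j]? ≠ some '\n')

theorem free_of_rfind_neg (d : List Char) (c : Char)
    (h : PySem.Chars.rfind d [c] = -1) : ∀ j : Nat, d[j]? ≠ some c := by
  unfold PySem.Chars.rfind at h
  intro j hj
  have hlt : j < d.length := by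
    by_contra hge
    rw [List.getElem?_eq_none (by omega)] at hj
    simp at hj
  exact (go_eq_neg_one_iff d c d.length).mp h j (by omega) hj

theorem free_append (b d : List Char) (c : Char) (hb : ∀ j : Nat, b[j]? ≠ some c)
    (hd : ∀ j : Nat, d[j]? ≠ some c) : ∀ j : Nat, (b ++ d)[j]? ≠ some c := by
  intro j
  rcases Nat.lt_or_ge j b.length with h | h
  · rw [List.getElem?_append_left h]; exact hb j
  · rw [List.getElem?_append_right h]; exact hd _

-- one step of A equals one step of M on a whitespace-free buffer, and M's step keeps it whitespace-free
theorem step_agree (st : List String × List Char) (delta : String) (hb : WsFree st.2) :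
    wbcA_step st delta = wbcM_step st delta ∧ WsFree (wbcM_step st delta).2 := by
  obtain ⟨acc, b⟩ := st
  obtain ⟨hbs, hbn⟩ := hb
  simp only [wbcA_step, wbcM_step]
  set d := delta.toList with hd
  have hsp := rfind_append_free b d ' ' hbs
  have hnl := rfind_append_free b d '\n' hbn
  have hx1 : -1 ≤ PySem.Chars.rfind d [' '] := neg_one_le_rfind d ' '
  have hy1 : -1 ≤ PySem.Chars.rfind d ['\n'] := neg_one_le_rfind d '\n'
  by_cases hm : 0 ≤ max (PySem.Chars.rfind d [' ']) (PySem.Chars.rfind d ['\n'])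
  · obtain ⟨m, hmm⟩ : ∃ m : Nat,
        max (PySem.Chars.rfind d [' ']) (PySem.Chars.rfind d ['\n']) = (m : Int) :=
      ⟨(max (PySem.Chars.rfind d [' ']) (PySem.Chars.rfind d ['\n'])).toNat, by omega⟩
    have hlast : max (PySem.Chars.rfind (b ++ d) [' ']) (PySem.Chars.rfind (b ++ d) ['\n'])
        = (b.length : Int) + m := by
      rw [hsp, hnl]; split_ifs <;> omega
    have htake : PySem.Chars.slice (b ++ d) none (some ((b.length : Int) + m + 1))
        = b ++ PySem.Chars.slice d none (some ((m : Int) + 1)) := by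
      rw [show (b.length : Int) + m + 1 = ((b.length + (m + 1) : Nat) : Int) by push_cast; ring,
        show (m : Int) + 1 = ((m + 1 : Nat) : Int) by push_cast; ring,
        PySem.Chars.slice_eq_listSlice, PySem.Chars.slice_eq_listSlice,
        PySem.List.slice_to_natCast, PySem.List.slice_to_natCast, List.take_append,
        List.take_of_length_le (by omega), Nat.add_sub_cancel_left]
    have hdrop : PySem.Chars.slice (b ++ d) (some ((b.length : Int) + m + 1)) none
        = PySem.Chars.slice d (some ((m : Int) + 1)) none := by
      rw [show (b.length : Int) + m + 1 = ((b.length + (m + 1) : Nat) : Int) by push_cast; ring,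
        show (m : Int) + 1 = ((m + 1 : Nat) : Int) by push_cast; ring,
        PySem.Chars.slice_eq_listSlice, PySem.Chars.slice_eq_listSlice,
        PySem.List.slice_from_natCast, PySem.List.slice_from_natCast, List.drop_append,
        List.drop_eq_nil_of_le (by omega), Nat.add_sub_cancel_left, List.nil_append]
    rw [hlast, hmm, if_pos (by omega : (0:Int) ≤ (b.length : Int) + m),
      if_pos (by omega : (0:Int) ≤ (m : Int)), htake, hdrop]
    refine ⟨rfl, ?_⟩
    show WsFree (PySem.Chars.slice d (some ((m : Int) + 1)) none)
    rw [PySem.Chars.slice_eq_listSlice,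
      show (m : Int) + 1 = ((m + 1 : Nat) : Int) by push_cast; ring,
      PySem.List.slice_from_natCast]
    constructor <;>
    · intro j hj
      have hlt : m + 1 + j < d.length := by
        by_contra hge
        rw [List.getElem?_drop, List.getElem?_eq_none (by omega)] at hj
        simp at hj
      rw [List.getElem?_drop] at hj
      have := le_go_of_getElem d _ d.length (m + 1 + j) (by omega) hj
      unfold PySem.Chars.rfind at hmm
      omega
  · have hx0 : PySem.Chars.rfind d [' '] = -1 := by omega
    have hy0 : PySem.Chars.rfind d ['\n'] = -1 := by omega
    have hlast : max (PySem.Chars.rfind (b ++ d) [' ']) (PySem.Chars.rfind (b ++ d) ['\n'])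
        = -1 := by rw [hsp, hnl, hx0, hy0]; simp
    rw [hlast, if_neg (by omega), if_neg hm]
    exact ⟨rfl, free_append b d ' ' hbs (free_of_rfind_neg d ' ' hx0),
           free_append b d '\n' hbn (free_of_rfind_neg d '\n' hy0)⟩

theorem foldl_agree (ds : List String) (st : List String × List Char) (hb : WsFree st.2) :
    ds.foldl wbcA_step st = ds.foldl wbcM_step st := by
  induction ds generalizing st with
  | nil => rfl
  | cons d ds ih =>
    obtain ⟨heq, hinv⟩ := step_agree st d hb
    rw [List.foldl_cons, List.foldl_cons, heq]
    exact ih (wbcM_step st d) hinv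

-- M's step in take/drop form
theorem M_step_eq (acc : List String) (b : List Char) (delta : String) :
    wbcM_step (acc, b) delta =
      if 0 ≤ max (PySem.Chars.rfind delta.toList [' ']) (PySem.Chars.rfind delta.toList ['\n']) then
        (acc ++ [String.ofList (b ++ delta.toList.take
            (max (PySem.Chars.rfind delta.toList [' ']) (PySem.Chars.rfind delta.toList ['\n']) + 1).toNat)],
         delta.toList.drop
            (max (PySem.Chars.rfind delta.toList [' ']) (PySem.Chars.rfind delta.toList ['\n']) + 1).toNat)
      else (acc, b ++ delta.toList) := by
  simp only [wbcM_step]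
  by_cases hw : 0 ≤ max (PySem.Chars.rfind delta.toList [' ']) (PySem.Chars.rfind delta.toList ['\n'])
  · obtain ⟨m, hm⟩ : ∃ m : Nat,
        max (PySem.Chars.rfind delta.toList [' ']) (PySem.Chars.rfind delta.toList ['\n']) = (m : Int) :=
      ⟨(max (PySem.Chars.rfind delta.toList [' ']) (PySem.Chars.rfind delta.toList ['\n'])).toNat, by omega⟩
    rw [if_pos hw, if_pos hw, hm,
      show (m : Int) + 1 = ((m + 1 : Nat) : Int) by push_cast; ring,
      PySem.Chars.slice_eq_listSlice, PySem.Chars.slice_eq_listSlice,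
      PySem.List.slice_to_natCast, PySem.List.slice_from_natCast]
    simp
  · rw [if_neg hw, if_neg hw]

-- cutsN shifts additively in the offset
theorem cutsN_shift (ds : List String) (k off : Nat) :
    cutsN (k + off) ds = (cutsN off ds).map (k + ·) := by
  induction ds generalizing off with
  | nil => rfl
  | cons d ds ih =>
    simp only [cutsN]
    rw [show k + off + d.toList.length = k + (off + d.toList.length) by omega, ih]
    split <;> simp [Nat.add_assoc]

-- emitN shifts: a common prefix length k can be dropped from the text and all cuts
theorem emitN_shift (text : List Char) (k : Nat) (hk : k ≤ text.length)
    (cs : List Nat) (prev : Nat) :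
    emitN text (k + prev) (cs.map (k + ·)) = emitN (text.drop k) prev cs := by
  induction cs generalizing prev with
  | nil =>
    simp only [List.map_nil, emitN, List.length_drop, List.drop_drop]
    rw [show k + prev = prev + k by omega]
    split_ifs <;> first | rfl | omega
  | cons c cs ih =>
    simp only [List.map_cons, emitN]
    rw [show k + c - (k + prev) = c - prev by omega, List.drop_drop,
      show k + prev = prev + k by omega, ih c]

-- main invariant: M's stream, finalized, equals B's staged emit over the joined text
theorem M_eq_staged (ds : List String) (acc : List String) (b : List Char) :
    finalizeM (ds.foldl wbcM_step (acc, b))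
      = acc ++ emitN (b ++ (ds.map String.toList).flatten) 0 (cutsN b.length ds) := by
  induction ds generalizing acc b with
  | nil =>
    simp only [List.foldl_nil, finalizeM, List.map_nil, List.flatten_nil, List.append_nil,
      cutsN, emitN, List.drop_zero]
    by_cases hb : b.isEmpty
    · rw [if_pos hb, if_neg (by simp_all), List.append_nil]
    · have hne : b ≠ [] := by simpa using hb
      rw [if_neg hb, if_pos (List.length_pos_of_ne_nil hne)]
  | cons d ds ih =>
    rw [List.foldl_cons, M_step_eq]
    simp only [cutsN, List.map_cons, List.flatten_cons]
    by_cases hw : 0 ≤ max (PySem.Chars.rfind d.toList [' ']) (PySem.Chars.rfind d.toList ['\n'])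
    · rw [if_pos hw, if_pos hw]
      set w := max (PySem.Chars.rfind d.toList [' ']) (PySem.Chars.rfind d.toList ['\n']) with hwdef
      set m := (w + 1).toNat with hm
      have hwlt : w < (d.toList.length : Int) := by
        rcases max_cases (PySem.Chars.rfind d.toList [' ']) (PySem.Chars.rfind d.toList ['\n']) with
          ⟨h1, _⟩ | ⟨h1, _⟩ <;> rw [hwdef, h1] <;>
          exact rfind_lt_length _ _ (by omega)
      have hmle : m ≤ d.toList.length := by omega
      rw [ih]
      simp only [List.singleton_append, emitN, List.drop_zero, Nat.sub_zero]
      have htext : (b ++ (d.toList ++ (ds.map String.toList).flatten)).take (b.length + m)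
          = b ++ d.toList.take m := by
        rw [List.take_append, List.take_of_length_le (by omega), Nat.add_sub_cancel_left,
          List.take_append_of_le_length hmle]
      have hdroptext : (b ++ (d.toList ++ (ds.map String.toList).flatten)).drop (b.length + m)
          = d.toList.drop m ++ (ds.map String.toList).flatten := by
        rw [List.drop_append, List.drop_eq_nil_of_le (by omega), Nat.add_sub_cancel_left,
          List.nil_append, List.drop_append_of_le_length hmle]
      have hcuts : cutsN (b.length + d.toList.length) ds
          = (cutsN (d.toList.drop m).length ds).map ((b.length + m) + ·) := by
        rw [List.length_drop, ← cutsN_shift,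
          show b.length + m + (d.toList.length - m) = b.length + d.toList.length by omega]
      have hshift := emitN_shift (b ++ (d.toList ++ (ds.map String.toList).flatten))
        (b.length + m) (by simp only [List.length_append]; omega)
        (cutsN (d.toList.drop m).length ds) 0
      rw [Nat.add_zero] at hshift
      rw [htext, hcuts, hshift, hdroptext, List.append_assoc, List.singleton_append]
    · rw [if_neg hw, if_neg hw, ih, List.nil_append, ← List.append_assoc,
        show (b ++ d.toList).length = b.length + d.toList.length by simp]

-- B's first pass computes cutsN (as Int casts) together with the total length
theorem cut_fold_eq (ds : List String) (cs : List Int) (off : Nat) :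
    ds.foldl wbcCut_step (cs, (off : Int))
      = (cs ++ (cutsN off ds).map Int.ofNat,
         ((off + ((ds.map String.toList).flatten).length : Nat) : Int)) := by
  induction ds generalizing cs off with
  | nil => simp [cutsN]
  | cons d ds ih =>
    rw [List.foldl_cons]
    simp only [wbcCut_step, cutsN]
    by_cases hw : 0 ≤ max (PySem.Chars.rfind d.toList [' ']) (PySem.Chars.rfind d.toList ['\n'])
    · rw [if_pos hw, if_pos hw]
      rw [show (off : Int) + max (PySem.Chars.rfind d.toList [' ']) (PySem.Chars.rfind d.toList ['\n']) + 1
          = ((off + (max (PySem.Chars.rfind d.toList [' ']) (PySem.Chars.rfind d.toList ['\n']) + 1).toNat : Nat) : Int) by push_cast; omega,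
        show (off : Int) + (d.toList.length : Int) = ((off + d.toList.length : Nat) : Int) by push_cast; ring,
        ih]
      simp only [List.singleton_append, List.map_cons, List.flatten_cons, List.length_append,
        Int.ofNat_eq_natCast, Prod.mk.injEq]
      refine ⟨by simp, by congr 1; omega⟩
    · rw [if_neg hw, if_neg hw,
        show (off : Int) + (d.toList.length : Int) = ((off + d.toList.length : Nat) : Int) by push_cast; ring,
        ih]
      simp only [List.map_cons, List.flatten_cons, List.length_append, List.nil_append,
        Prod.mk.injEq]
      exact ⟨trivial, by congr 1; omega⟩

-- B's second pass plus the tail check equals emitN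
theorem emit_fold_eq (text : List Char) (cs : List Nat) (acc : List String) (prev : Nat) :
    (let r := (cs.map Int.ofNat).foldl (wbcEmit_step text) (acc, (prev : Int));
     if r.2 < (text.length : Int) then r.1 ++ [String.ofList (PySem.Chars.slice text (some r.2) none)]
     else r.1)
      = acc ++ emitN text prev cs := by
  induction cs generalizing acc prev with
  | nil =>
    simp only [List.map_nil, List.foldl_nil, emitN]
    rw [PySem.Chars.slice_eq_listSlice, PySem.List.slice_from_natCast]
    by_cases h : prev < text.length
    · rw [if_pos (by exact_mod_cast h), if_pos h]
    · rw [if_neg (by exact_mod_cast h), if_neg h, List.append_nil]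
  | cons c cs ih =>
    simp only [List.map_cons, List.foldl_cons, emitN, Int.ofNat_eq_natCast]
    rw [show wbcEmit_step text (acc, (prev : Int)) (c : Int)
        = (acc ++ [String.ofList ((text.drop prev).take (c - prev))], (c : Int)) by
      simp only [wbcEmit_step]
      rw [PySem.Chars.slice_eq_listSlice, PySem.List.slice_natCast]]
    have := ih (acc ++ [String.ofList ((text.drop prev).take (c - prev))]) c
    rw [this, List.append_assoc, List.singleton_append]

-- ===== VERDICT (by name: the statement is the Claim_ definition above) =====
theorem word_boundary_chunks_py_spec : Claim_equal_word_boundary_chunks_py := by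
  intro raw_deltas _
  unfold Spec_word_boundary_chunks_py
  show word_boundary_chunks_py raw_deltas = word_boundary_chunks_py_alt raw_deltas
  have hA : word_boundary_chunks_py raw_deltas
      = finalizeM (raw_deltas.foldl wbcM_step ([], [])) := by
    rw [word_boundary_chunks_py,
      foldl_agree raw_deltas ([], []) ⟨fun j => by simp, fun j => by simp⟩]
    rfl
  rw [hA, M_eq_staged raw_deltas [] []]
  have hB : word_boundary_chunks_py_alt raw_deltas
      = [] ++ emitN ((raw_deltas.map String.toList).flatten) 0 (cutsN 0 raw_deltas) := by
    rw [word_boundary_chunks_py_alt]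
    rw [show (0 : Int) = ((0 : Nat) : Int) by rfl, cut_fold_eq raw_deltas [] 0]
    exact emit_fold_eq ((raw_deltas.map String.toList).flatten) (cutsN 0 raw_deltas) [] 0
  rw [hB]
  simp
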